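-- pv_equiv track=rewrite | github.com/2019920393/coding-agent | codo/services/memory/extract.py | _count_model_visible_since
-- ===== SOURCE A (Python) =====
-- from typing import Any, Dict, List, Optional
--
-- def _count_model_visible_since(
--     messages: List[Dict[str, Any]],
--     since_uuid: Optional[str],
-- ) -> int:
--     """
--     统计给定 UUID 之后的模型可见消息数量（user/assistant）。
--
--     Args:
--         messages: 完整对话消息列表
--         since_uuid: 起始 UUID；若为 None，则统计全部
--
--     Returns:
--         自游标之后的模型可见消息数量
--     """
--     if since_uuid is None:
--         return sum(1 for m in messages if m.get("role") in ("user", "assistant"))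
--
--     found_start = False
--     count = 0
--     for m in messages:
--         if not found_start:
--             if m.get("uuid") == since_uuid:
--                 found_start = True
--             continue
--         if m.get("role") in ("user", "assistant"):
--             count += 1
--
--     # 如果 UUID 找不到（例如已被 compact 删除），则回退为统计全部，
--     # 避免抽取功能被永久卡死。
--     if not found_start:
--         return sum(1 for m in messages if m.get("role") in ("user", "assistant"))
--
--     return count
-- ===== SOURCE B (Python) =====
-- from typing import Any, Dict, List, Optional
--
--
-- def _count_model_visible_since(
--     messages: List[Dict[str, Any]],
--     since_uuid: Optional[str],
-- ) -> int:
--     # Single backward pass: walk from the newest message toward the oldest,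
--     # counting model-visible (user/assistant) messages, and stop as soon as
--     # the anchor uuid is reached.  If since_uuid is None or the anchor is
--     # absent the walk covers the whole list, which is exactly the intended
--     # count-everything fallback -- no separate fallback pass is needed.
--     count = 0
--     for m in reversed(messages):
--         if since_uuid is not None and m.get("uuid") == since_uuid:
--             return count
--         if m.get("role") in ("user", "assistant"):
--             count += 1
--     return count
-- ===== Notes on version B (the rewrite author's own statement) =====
-- stated objective: simpler
-- what changed: Replaced A's forward flag loop plus a duplicated count-everything fallback pass by a single backward walk from the newest message that counts user/assistant messages and stops at the anchor; the not-found fallback comes for free because the walk then covers the whole list.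
import Mathlib
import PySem

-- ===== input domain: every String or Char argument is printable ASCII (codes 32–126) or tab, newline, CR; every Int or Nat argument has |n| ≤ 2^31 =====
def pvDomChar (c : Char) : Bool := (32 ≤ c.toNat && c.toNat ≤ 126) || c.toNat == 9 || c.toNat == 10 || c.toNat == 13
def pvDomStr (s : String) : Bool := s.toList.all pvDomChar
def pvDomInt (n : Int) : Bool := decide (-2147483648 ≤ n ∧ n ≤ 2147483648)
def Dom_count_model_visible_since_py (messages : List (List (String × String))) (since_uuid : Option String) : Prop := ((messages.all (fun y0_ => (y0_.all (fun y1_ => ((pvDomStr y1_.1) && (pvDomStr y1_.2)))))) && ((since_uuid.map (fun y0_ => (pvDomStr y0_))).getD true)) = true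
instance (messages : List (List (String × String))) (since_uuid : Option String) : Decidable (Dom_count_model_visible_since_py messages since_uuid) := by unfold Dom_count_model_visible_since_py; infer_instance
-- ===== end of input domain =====

-- B replaces A's forward flag loop + duplicated fallback pass by one backward walk that
-- stops at the anchor; simpler, same values wherever the anchor uuid is not duplicated.

-- ===== PORT A =====
-- m.get("role") in ("user", "assistant")
def pvVisA (m : List (String × String)) : Bool :=
  PySem.Dict.get? (PySem.Dict.mk m) "role" == some "user" || PySem.Dict.get? (PySem.Dict.mk m) "role" == some "assistant"

-- sum(1 for m in messages if m.get("role") in ("user","assistant"))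
def pvSumA (messages : List (List (String × String))) : Int :=
  messages.foldl (fun acc m => if pvVisA m then acc + 1 else acc) 0

def count_model_visible_since_py (messages : List (List (String × String))) (since_uuid : Option String) : Int :=
  match since_uuid with
  | none => pvSumA messages
  | some u =>
    let st := messages.foldl (fun (st : Bool × Int) m =>
      if st.1 = false then
        (if PySem.Dict.get? (PySem.Dict.mk m) "uuid" == some u then (true, st.2) else st)
      else if pvVisA m then (st.1, st.2 + 1) else st) (false, 0)
    if st.1 = false then pvSumA messages else st.2

-- ===== PORT B =====
def pvVisB (m : List (String × String)) : Bool :=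
  PySem.Dict.get? (PySem.Dict.mk m) "role" == some "user" || PySem.Dict.get? (PySem.Dict.mk m) "role" == some "assistant"

-- since_uuid is not None and m.get("uuid") == since_uuid
def pvAnchB (su : Option String) (m : List (String × String)) : Bool :=
  match su with
  | none => false
  | some u => PySem.Dict.get? (PySem.Dict.mk m) "uuid" == some u

-- the 'for m in reversed(messages)' loop with early return
def pvRevLoop (su : Option String) : List (List (String × String)) → Int → Int
  | [], c => c
  | m :: rest, c =>
    if pvAnchB su m then c
    else pvRevLoop su rest (if pvVisB m then c + 1 else c)

def count_model_visible_since_py_alt (messages : List (List (String × String))) (since_uuid : Option String) : Int :=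
  pvRevLoop since_uuid messages.reverse 0

-- ===== PRECONDITION & SPEC =====
-- Pre_ excludes inputs where since_uuid matches the uuid of more than one message: A anchors
-- at the FIRST match while B anchors at the LAST, both defensible choices on duplicate ids.
def Pre_count_model_visible_since_py (messages : List (List (String × String))) (since_uuid : Option String) : Prop :=
  (since_uuid.elim true (fun u =>
    decide (messages.countP (fun m => PySem.Dict.get? (PySem.Dict.mk m) "uuid" == some u) ≤ 1))) = true
instance (messages : List (List (String × String))) (since_uuid : Option String) : Decidable (Pre_count_model_visible_since_py messages since_uuid) := by unfold Pre_count_model_visible_since_py; infer_instance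

def pvWitness_count_model_visible_since_py : (List (List (String × String))) × Option String :=
  ([[("uuid", "a"), ("role", "user")], [("role", "assistant")]], some "a")

def Spec_count_model_visible_since_py (messages : List (List (String × String))) (since_uuid : Option String) (out : Int) : Prop := out = count_model_visible_since_py_alt messages since_uuid
instance (messages : List (List (String × String))) (since_uuid : Option String) (out : Int) : Decidable (Spec_count_model_visible_since_py messages since_uuid out) := by unfold Spec_count_model_visible_since_py; infer_instance

-- ===== CLAIM (what is proved, stated in full; the proofs are below) =====
def Claim_equal_count_model_visible_since_py : Prop := ∀ (messages : List (List (String × String))) (since_uuid : Option String), Dom_count_model_visible_since_py messages since_uuid → Pre_count_model_visible_since_py messages since_uuid → Spec_count_model_visible_since_py messages since_uuid (count_model_visible_since_py messages since_uuid)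

-- ===== LEMMAS AND PROOFS =====

theorem pvVisA_eq_visB (m : List (String × String)) : pvVisA m = pvVisB m := rfl

-- abbreviation used only by the proofs
def pvAnchor (u : String) (m : List (String × String)) : Bool :=
  PySem.Dict.get? (PySem.Dict.mk m) "uuid" == some u

theorem pvSumA_acc (messages : List (List (String × String))) (acc : Int) :
    messages.foldl (fun acc m => if pvVisA m then acc + 1 else acc) acc
      = acc + (messages.countP pvVisB : Nat) := by
  induction messages generalizing acc with
  | nil => simp
  | cons m rest ih =>
    rw [List.foldl_cons, List.countP_cons, pvVisA_eq_visB]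
    by_cases h : pvVisB m = true
    · rw [if_pos h, if_pos h, ih]; push_cast; ring
    · rw [if_neg h, if_neg h, ih]; simp

theorem pvSumA_eq (messages : List (List (String × String))) :
    pvSumA messages = ((messages.countP pvVisB : Nat) : Int) := by
  simpa using pvSumA_acc messages 0

-- B's reverse loop when no element of the list is the anchor: it counts everything
theorem pvRevLoop_noanchor (su : Option String) (l : List (List (String × String))) (c : Int)
    (h : ∀ m ∈ l, pvAnchB su m = false) :
    pvRevLoop su l c = c + (l.countP pvVisB : Nat) := by
  induction l generalizing c with
  | nil => simp [pvRevLoop]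
  | cons m rest ih =>
    have hm := h m (List.mem_cons_self ..)
    rw [pvRevLoop, if_neg (by simp [hm]), ih _ (fun x hx => h x (List.mem_cons_of_mem _ hx)),
        List.countP_cons]
    by_cases hv : pvVisB m = true
    · rw [if_pos hv]; simp [hv]; ring
    · rw [if_neg hv]; simp [hv]

-- B's reverse loop stops at the anchor and returns the count of the prefix before it
theorem pvRevLoop_stop (su : Option String) (p : List (List (String × String)))
    (m : List (String × String)) (q : List (List (String × String))) (c : Int)
    (hm : pvAnchB su m = true) (hp : ∀ x ∈ p, pvAnchB su x = false) :
    pvRevLoop su (p ++ m :: q) c = c + (p.countP pvVisB : Nat) := by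
  induction p generalizing c with
  | nil => simp [pvRevLoop, hm]
  | cons x xs ih =>
    have hx := hp x (List.mem_cons_self ..)
    rw [List.cons_append, pvRevLoop, if_neg (by simp [hx]),
        ih _ (fun y hy => hp y (List.mem_cons_of_mem _ hy)), List.countP_cons]
    by_cases hv : pvVisB x = true
    · rw [if_pos hv]; simp [hv]; ring
    · rw [if_neg hv]; simp [hv]

-- A's flag fold, with accumulator already in the counting state
theorem pvFoldA_true (u : String) (l : List (List (String × String))) (c : Int) :
    l.foldl (fun (st : Bool × Int) m =>
      if st.1 = false then
        (if PySem.Dict.get? (PySem.Dict.mk m) "uuid" == some u then (true, st.2) else st)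
      else if pvVisA m then (st.1, st.2 + 1) else st) (true, c)
      = (true, c + (l.countP pvVisB : Nat)) := by
  induction l generalizing c with
  | nil => simp
  | cons x xs ih =>
    rw [List.foldl_cons, List.countP_cons]
    simp only [Bool.true_eq_false, if_false]
    by_cases hx : pvVisA x = true
    · rw [if_pos hx, ih]
      rw [pvVisA_eq_visB] at hx
      rw [if_pos hx]
      simp only [Prod.mk.injEq, true_and]
      push_cast; ring
    · rw [if_neg hx, ih]
      rw [pvVisA_eq_visB] at hx
      rw [if_neg hx]
      simp

-- A's flag fold over an anchor-free list stays in the searching state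
theorem pvFoldA_false (u : String) (l : List (List (String × String)))
    (h : ∀ m ∈ l, pvAnchor u m = false) :
    l.foldl (fun (st : Bool × Int) m =>
      if st.1 = false then
        (if PySem.Dict.get? (PySem.Dict.mk m) "uuid" == some u then (true, st.2) else st)
      else if pvVisA m then (st.1, st.2 + 1) else st) (false, 0)
      = (false, 0) := by
  induction l with
  | nil => simp
  | cons x xs ih =>
    have hx : (PySem.Dict.get? (PySem.Dict.mk x) "uuid" == some u) = false := by
      simpa [pvAnchor] using h x (List.mem_cons_self ..)
    rw [List.foldl_cons]
    simpa [hx] using ih (fun y hy => h y (List.mem_cons_of_mem _ hy))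

-- A's flag fold over a list split at its first anchor
theorem pvFoldA_split (u : String) (p : List (List (String × String)))
    (m : List (String × String)) (q : List (List (String × String)))
    (hm : pvAnchor u m = true) (hp : ∀ x ∈ p, pvAnchor u x = false) :
    (p ++ m :: q).foldl (fun (st : Bool × Int) m =>
      if st.1 = false then
        (if PySem.Dict.get? (PySem.Dict.mk m) "uuid" == some u then (true, st.2) else st)
      else if pvVisA m then (st.1, st.2 + 1) else st) (false, 0)
      = (true, ((q.countP pvVisB : Nat) : Int)) := by
  rw [List.foldl_append, pvFoldA_false u p hp, List.foldl_cons]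
  have hm' : (PySem.Dict.get? (PySem.Dict.mk m) "uuid" == some u) = true := by
    simpa [pvAnchor] using hm
  have hinit : (if ((false, (0 : Int)).1 = false) then
      (if PySem.Dict.get? (PySem.Dict.mk m) "uuid" == some u then (true, (false, (0 : Int)).2)
       else ((false : Bool), (0 : Int)))
      else if pvVisA m then ((false, (0 : Int)).1, (false, (0 : Int)).2 + 1)
      else ((false : Bool), (0 : Int))) = ((true : Bool), (0 : Int)) := by simp [hm']
  rw [hinit, pvFoldA_true]
  simp

-- split a list at its first element satisfying p
theorem pvExistsSplit {α : Type} (p : α → Bool) (l : List α) (h : l.countP p ≠ 0) :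
    ∃ l1 m l2, l = l1 ++ m :: l2 ∧ p m = true ∧ l1.countP p = 0 := by
  induction l with
  | nil => simp at h
  | cons a t ih =>
    by_cases ha : p a = true
    · exact ⟨[], a, t, by simp, ha, by simp⟩
    · rw [List.countP_cons, if_neg ha] at h
      obtain ⟨l1, m, l2, rfl, hm, h1⟩ := ih (by simpa using h)
      exact ⟨a :: l1, m, l2, rfl, hm, by simp [ha, h1]⟩

-- ===== VERDICT (by name: the statement is the Claim_ definition above) =====
theorem count_model_visible_since_py_spec : Claim_equal_count_model_visible_since_py := by
  intro messages since_uuid _ hpre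
  cases since_uuid with
  | none =>
    show count_model_visible_since_py messages none = count_model_visible_since_py_alt messages none
    show pvSumA messages = pvRevLoop none messages.reverse 0
    rw [pvRevLoop_noanchor none _ 0 (by intro m _; rfl), pvSumA_eq]
    simp [List.countP_reverse]
  | some u =>
    have hpre' : messages.countP (pvAnchor u) ≤ 1 := of_decide_eq_true hpre
    show count_model_visible_since_py messages (some u) = count_model_visible_since_py_alt messages (some u)
    show (let st := messages.foldl (fun (st : Bool × Int) m =>
      if st.1 = false then
        (if PySem.Dict.get? (PySem.Dict.mk m) "uuid" == some u then (true, st.2) else st)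
      else if pvVisA m then (st.1, st.2 + 1) else st) (false, 0)
      ; if st.1 = false then pvSumA messages else st.2) = pvRevLoop (some u) messages.reverse 0
    by_cases h0 : messages.countP (pvAnchor u) = 0
    · -- anchor absent: both count everything
      have hall : ∀ m ∈ messages, pvAnchor u m = false := by
        intro m hm
        have := List.countP_eq_zero.mp h0 m hm
        simpa using this
      rw [show (let st := messages.foldl (fun (st : Bool × Int) m =>
        if st.1 = false then
          (if PySem.Dict.get? (PySem.Dict.mk m) "uuid" == some u then (true, st.2) else st)
        else if pvVisA m then (st.1, st.2 + 1) else st) (false, 0)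
        ; if st.1 = false then pvSumA messages else st.2) = pvSumA messages from by
          rw [pvFoldA_false u messages hall]; rfl]
      rw [pvRevLoop_noanchor (some u) _ 0
        (by intro m hm; simpa [pvAnchB, pvAnchor] using hall m (List.mem_reverse.mp hm)),
        pvSumA_eq]
      simp [List.countP_reverse]
    · -- exactly one anchor: split at it
      obtain ⟨l1, m, l2, rfl, hm, h1⟩ := pvExistsSplit (pvAnchor u) messages h0
      have h1' : ∀ x ∈ l1, pvAnchor u x = false := by
        intro x hx
        have := List.countP_eq_zero.mp h1 x hx
        simpa using this
      have h2 : l2.countP (pvAnchor u) = 0 := by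
        rw [List.countP_append, List.countP_cons] at hpre'
        simp only [hm, if_pos] at hpre'
        omega
      rw [pvFoldA_split u l1 m l2 hm h1']
      simp only [Bool.true_eq_false, if_false]
      have hrev : (l1 ++ m :: l2).reverse = l2.reverse ++ m :: l1.reverse := by
        simp
      rw [hrev, pvRevLoop_stop (some u) _ m _ 0
        (by simpa [pvAnchB, pvAnchor] using hm)
        (by intro x hx
            have := List.countP_eq_zero.mp h2 x (List.mem_reverse.mp hx)
            simpa [pvAnchB, pvAnchor] using this)]
      simp [List.countP_reverse]
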